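-- pv_equiv track=rewrite | github.com/minsung8/algorithmProblem_Exercise | p020.py | larrysArray
-- ===== SOURCE A (Python) =====
-- def larrysArray(A):
--
--     answer = sorted(A)
--     start_idx = 0
--     pre_A = A
--
--     while True:
--
--         for i in range(start_idx, len(A) - 2):
--
--             A = A[:i] + rotate(A[i:i+3]) + A[i+3:]
--
--         if A == answer: return "YES"
--
--         if pre_A == A: break
--         pre_A = A.copy()
--
--     return "NO"
--
-- def rotate(_list):
--
--     _min = min(_list)
--
--     if _list[0] == _min: return _list
--     elif _list[1] == _min: return [_list[1], _list[2], _list[0]]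
--     else: return [_list[2], _list[0], _list[1]]
-- ===== SOURCE B (Python) =====
-- def larrysArray(A):
--     # A permutation is sortable by 3-rotations iff its inversion count is even:
--     # count inversions once and test the parity (no simulation of the rotations).
--     inv = 0
--     rest = list(A)
--     while rest:
--         x = rest.pop(0)
--         inv += sum(1 for y in rest if y < x)
--     return "YES" if inv % 2 == 0 else "NO"
-- ===== Notes on version B (the rewrite author's own statement) =====
-- stated objective: faster
-- what changed: B replaces A's repeated full passes of greedy 3-rotations (re-slicing the list at every window until a fixed point) by a single inversion count whose parity decides the answer.
-- outside the precondition, e.g. on larrysArray([4, -3, -3, -4, -2]): A returns 'NO', B returns 'YES'; on larrysArray([1, 1, 3, 2]): A returns 'NO', B returns 'NO'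
import Mathlib
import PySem

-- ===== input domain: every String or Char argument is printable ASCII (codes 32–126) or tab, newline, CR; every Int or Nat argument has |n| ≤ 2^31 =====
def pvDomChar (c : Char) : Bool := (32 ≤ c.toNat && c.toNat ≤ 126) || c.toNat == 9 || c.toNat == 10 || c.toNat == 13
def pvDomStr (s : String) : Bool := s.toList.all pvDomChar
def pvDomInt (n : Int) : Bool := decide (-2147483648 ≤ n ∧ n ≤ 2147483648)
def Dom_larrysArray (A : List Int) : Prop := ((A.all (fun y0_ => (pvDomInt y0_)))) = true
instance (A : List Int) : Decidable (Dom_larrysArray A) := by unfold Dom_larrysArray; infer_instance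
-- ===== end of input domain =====

-- B replaces A's repeated greedy passes of 3-rotations by a single inversion count whose
-- parity decides the answer.

-- ===== PORT A =====

-- inversion count (the helper of port B below; it is also the leading component of the
-- termination measure of A's `while True` loop, so it is defined first)
def pvInv : List Int → Nat
  | [] => 0
  | x :: rest => rest.countP (fun y => decide (y < x)) + pvInv rest

-- weight of a value inside list X, used by the loop's fuel bound below:
-- pvWt X x = 2 ^ (number of distinct values of X smaller than x)
def pvWt (X : List Int) (x : Int) : Nat :=
  2 ^ ((PySem.List.dedup X).countP (fun y => decide (y < x)))

-- `rotate`: Python's min([]) / _list[2] would raise on short lists, but in larrysArray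
-- rotate is only applied to slices of length exactly 3, so the fallbacks are never reached
def pvRotate (l : List Int) : List Int :=
  match PySem.List.min? l (fun x => x) with
  | none => l
  | some m =>
    if PySem.List.pyGetD l 0 m = m then l
    else if PySem.List.pyGetD l 1 m = m then
      [PySem.List.pyGetD l 1 m, PySem.List.pyGetD l 2 m, PySem.List.pyGetD l 0 m]
    else
      [PySem.List.pyGetD l 2 m, PySem.List.pyGetD l 0 m, PySem.List.pyGetD l 1 m]

-- loop body: A = A[:i] + rotate(A[i:i+3]) + A[i+3:]
def pvStep (X : List Int) (i : Int) : List Int :=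
  PySem.List.slice X none (some i) ++ pvRotate (PySem.List.slice X (some i) (some (i + 3)))
    ++ PySem.List.slice X (some (i + 3)) none

-- one iteration of the while-loop body: for i in range(start_idx, len(A) - 2): …
-- (start_idx is 0 and never changes)
def pvPass (A : List Int) : List Int :=
  (PySem.List.pyRange 0 ((A.length : Int) - 2) 1).foldl pvStep A

-- an upper bound used only in the fuel bound of the while-loop below
def pvPB (X : List Int) : Nat := (X.map (pvWt X)).sum * X.length

-- the while-loop; the fuel argument only makes the recursion total: larrysArray supplies
-- fuel proven below (pvM_lt_fuel / pvLoopF_eq) to exceed the number of iterations, so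
-- the fuel-exhausted branch is never reached.  pre_A equals A at every loop head
-- (pre_A = A initially, and pre_A = A.copy() right before the next iteration), so one
-- state variable suffices.
def pvLoop (fuel : Nat) (answer : List Int) (A : List Int) : String :=
  match fuel with
  | 0 => "NO"
  | fuel + 1 =>
    let A' := pvPass A
    if A' = answer then "YES"
    else if A = A' then "NO"
    else pvLoop fuel answer A'

def larrysArray (A : List Int) : String :=
  pvLoop (A.length * A.length * (pvPB A + 1) + pvPB A + 1)
    (PySem.List.sorted A (fun x => x) false) A

-- ===== PORT B =====

def larrysArray_alt (A : List Int) : String :=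
  if pvInv A % 2 = 0 then "YES" else "NO"

-- ===== PRECONDITION & SPEC =====

-- Pre_ excludes lists with repeated values: the problem is stated for permutations
-- (distinct entries), and on repeats A's greedy fixed point and B's parity test are both
-- accidental answers to a question neither implements (e.g. both answer "NO" on some
-- inputs that are sortable by 3-rotations), so neither value is canonical there.
def Pre_larrysArray (A : List Int) : Prop := A.Nodup
instance (A : List Int) : Decidable (Pre_larrysArray A) := by unfold Pre_larrysArray; infer_instance

def pvWitness_larrysArray : List Int := [3, 1, 2]

def Spec_larrysArray (A : List Int) (out : String) : Prop := out = larrysArray_alt A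
instance (A : List Int) (out : String) : Decidable (Spec_larrysArray A out) := by unfold Spec_larrysArray; infer_instance

-- ===== CLAIM (what is proved, stated in full; the proofs are below) =====
def Claim_equal_larrysArray : Prop := ∀ (A : List Int), Dom_larrysArray A → Pre_larrysArray A → Spec_larrysArray A (larrysArray A)

-- ===== LEMMAS AND PROOFS =====

-- secondary component of the termination measure: positions weighted by value rank
def pvPhiAux (w : Int → Nat) : List Int → Nat → Nat
  | [], _ => 0
  | x :: r, i => w x * i + pvPhiAux w r (i + 1)

def pvPhi (X : List Int) : Nat := pvPhiAux (pvWt X) X 0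

-- the combined Nat measure that strictly decreases with every changing pass
def pvM (X : List Int) : Nat := pvInv X * (pvPB X + 1) + pvPhi X

theorem pvCountP_lt (l : List Int) (p q : Int → Bool) (x : Int) (hx : x ∈ l) (hqx : q x = true)
    (hpx : p x = false) (himp : ∀ z ∈ l, p z = true → q z = true) :
    l.countP p < l.countP q := by
  induction l with
  | nil => cases hx
  | cons a t ih =>
    rcases List.mem_cons.1 hx with rfl | hxt
    · have h1 : t.countP p ≤ t.countP q :=
        List.countP_mono_left (fun z hz => himp z (List.mem_cons_of_mem _ hz))
      simp [hpx, hqx]; omega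
    · have h1 := ih hxt (fun z hz => himp z (List.mem_cons_of_mem _ hz))
      by_cases hpa : p a = true
      · have := himp a (List.mem_cons_self) hpa
        simp [hpa, this]; omega
      · simp only [List.countP_cons]
        have : q a = true ∨ q a = false := by cases q a <;> simp
        rcases this with h | h <;> simp [hpa, h] <;> omega

theorem pvWt_pos (X : List Int) (x : Int) : 0 < pvWt X x := by unfold pvWt; positivity

theorem pvWt_perm {X X' : List Int} (h : X.Perm X') : pvWt X = pvWt X' := by
  funext x
  unfold pvWt
  congr 1
  refine List.Perm.countP_eq _ ?_
  rw [List.perm_ext_iff_of_nodup (PySem.List.nodup_dedup X) (PySem.List.nodup_dedup X')]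
  intro a
  rw [PySem.List.mem_dedup, PySem.List.mem_dedup]
  exact h.mem_iff

theorem pvWt_double {X : List Int} {x y : Int} (hx : x ∈ X) (hlt : x < y) :
    2 * pvWt X x ≤ pvWt X y := by
  have hcnt : (PySem.List.dedup X).countP (fun z => decide (z < x))
      < (PySem.List.dedup X).countP (fun z => decide (z < y)) := by
    refine pvCountP_lt _ _ _ x ((PySem.List.mem_dedup X x).2 hx) (by simpa using hlt)
      (by simp) (fun z _ hz => by simp at hz ⊢; omega)
  unfold pvWt
  calc 2 * 2 ^ ((PySem.List.dedup X).countP (fun z => decide (z < x)))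
      = 2 ^ ((PySem.List.dedup X).countP (fun z => decide (z < x)) + 1) := by ring
    _ ≤ 2 ^ ((PySem.List.dedup X).countP (fun z => decide (z < y))) :=
        Nat.pow_le_pow_right (by norm_num) (by omega)

theorem pvPhiAux_append (w : Int → Nat) (U V : List Int) (i : Nat) :
    pvPhiAux w (U ++ V) i = pvPhiAux w U i + pvPhiAux w V (i + U.length) := by
  induction U generalizing i with
  | nil => simp [pvPhiAux]
  | cons x U ih =>
    simp [pvPhiAux, ih]
    ring_nf

theorem pvPhiAux3 (w : Int → Nat) (x y z : Int) (k : Nat) :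
    pvPhiAux w [x, y, z] k = w x * k + w y * (k + 1) + w z * (k + 2) := by
  simp [pvPhiAux]; ring

-- cross inversions between a left and a right block
def pvCross (U V : List Int) : Nat :=
  (U.map (fun u => V.countP (fun y => decide (y < u)))).sum

theorem pvInv_append (U V : List Int) :
    pvInv (U ++ V) = pvInv U + pvInv V + pvCross U V := by
  induction U with
  | nil => simp [pvInv, pvCross]
  | cons x U ih =>
    simp only [List.cons_append, pvInv, List.countP_append, ih, pvCross, List.map_cons,
      List.sum_cons]
    omega

theorem pvCross_perm_left {U U' : List Int} (h : U.Perm U') (V : List Int) :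
    pvCross U V = pvCross U' V :=
  (h.map _).sum_eq

theorem pvCross_perm_right (U : List Int) {V V' : List Int} (h : V.Perm V') :
    pvCross U V = pvCross U V' := by
  unfold pvCross
  congr 1
  exact List.map_congr_left (fun u _ => h.countP_eq _)

theorem pvInv_replace (P S W W' : List Int) (h : W.Perm W') :
    pvInv (P ++ W' ++ S) + pvInv W = pvInv (P ++ W ++ S) + pvInv W' := by
  rw [List.append_assoc, List.append_assoc, pvInv_append P (W' ++ S),
      pvInv_append P (W ++ S), pvInv_append W' S, pvInv_append W S,
      pvCross_perm_left h S, pvCross_perm_right P (h.append_right S)]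
  omega

theorem pvInv3 (a b c : Int) :
    pvInv [a, b, c] =
      (if b < a then 1 else 0) + (if c < a then 1 else 0) + (if c < b then 1 else 0) := by
  simp [pvInv, List.countP_cons]
  split_ifs <;> simp_all

theorem pvRotate_1 {a b c : Int} (h1 : a ≤ b) (h2 : a ≤ c) : pvRotate [a, b, c] = [a, b, c] := by
  have hm : min (min a b) c = a := by omega
  simp [pvRotate, PySem.List.min?_id_cons, PySem.List.pyGetD, PySem.List.pyIdx?,
    PySem.List.pyGet?, hm]

theorem pvRotate_2 {a b c : Int} (h1 : b < a) (h2 : b ≤ c) : pvRotate [a, b, c] = [b, c, a] := by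
  have hm : min (min a b) c = b := by omega
  have hne : ¬ a = b := by omega
  simp [pvRotate, PySem.List.min?_id_cons, PySem.List.pyGetD, PySem.List.pyIdx?,
    PySem.List.pyGet?, hm, hne]

theorem pvRotate_3 {a b c : Int} (h1 : c < a) (h2 : c < b) : pvRotate [a, b, c] = [c, a, b] := by
  have hm : min (min a b) c = c := by omega
  have hne : ¬ a = c := by omega
  have hne2 : ¬ b = c := by omega
  simp [pvRotate, PySem.List.min?_id_cons, PySem.List.pyGetD, PySem.List.pyIdx?,
    PySem.List.pyGet?, hm, hne, hne2]

theorem pvPerm2 (a b c : Int) : ([b, c, a]).Perm [a, b, c] :=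
  (List.Perm.cons b (List.Perm.swap a c [])).trans (List.Perm.swap a b [c])

theorem pvPerm3 (a b c : Int) : ([c, a, b]).Perm [a, b, c] :=
  (List.Perm.swap a c [b]).trans (List.Perm.cons a (List.Perm.swap b c []))

theorem pvStep_window (P S : List Int) (a b c : Int) :
    pvStep (P ++ a :: b :: c :: S) ((P.length : Int)) = P ++ pvRotate [a, b, c] ++ S := by
  unfold pvStep
  have e1 : PySem.List.slice (P ++ a :: b :: c :: S) none (some (P.length : Int)) = P := by
    rw [PySem.List.slice_to _ (by positivity)]
    simp
  have e2 : PySem.List.slice (P ++ a :: b :: c :: S) (some (P.length : Int))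
      (some ((P.length : Int) + 3)) = [a, b, c] := by
    rw [PySem.List.slice_toNat _ (by positivity) (by positivity)]
    have h1 : ((P.length : Int) + 3).toNat = P.length + 3 := by omega
    have h2 : ((P.length : Int)).toNat = P.length := by omega
    rw [h1, h2, List.drop_left' rfl]
    simp
  have e3 : PySem.List.slice (P ++ a :: b :: c :: S) (some ((P.length : Int) + 3)) none = S := by
    rw [PySem.List.slice_from _ (by positivity)]
    have h1 : ((P.length : Int) + 3).toNat = P.length + 3 := by omega
    rw [h1]
    have h2 : P ++ a :: b :: c :: S = (P ++ [a, b, c]) ++ S := by simp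
    rw [h2, List.drop_left' (by simp)]
  rw [e1, e2, e3]

-- the zero-inversion-change rotation (b < a < c) strictly lowers pvPhi
theorem pvPhi_case2 (P S : List Int) (a b c : Int) (_hba : b < a) (_hbc : b ≤ c) (hac : a < c) :
    pvPhi (P ++ [b, c, a] ++ S) < pvPhi (P ++ [a, b, c] ++ S) := by
  have hperm : (P ++ [b, c, a] ++ S).Perm (P ++ [a, b, c] ++ S) := by
    rw [List.append_assoc, List.append_assoc]
    exact List.Perm.append_left P ((pvPerm2 a b c).append_right S)
  have hw : pvWt (P ++ [b, c, a] ++ S) = pvWt (P ++ [a, b, c] ++ S) := pvWt_perm hperm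
  set w := pvWt (P ++ [a, b, c] ++ S) with hwdef
  have ha_mem : a ∈ P ++ [a, b, c] ++ S := by simp
  have hb_mem : b ∈ P ++ [a, b, c] ++ S := by simp
  have hdbl : 2 * w a ≤ w c := pvWt_double ha_mem hac
  have hbpos : 0 < w b := pvWt_pos _ b
  unfold pvPhi
  rw [hw, ← hwdef]
  rw [List.append_assoc, List.append_assoc, pvPhiAux_append w P, pvPhiAux_append w P,
      pvPhiAux_append w [b, c, a] S, pvPhiAux_append w [a, b, c] S]
  have e1 := pvPhiAux3 w b c a (0 + P.length)
  have e2 := pvPhiAux3 w a b c (0 + P.length)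
  simp only [List.length_cons, List.length_nil] at *
  rw [e1, e2]
  have : w b * (0 + P.length) + w c * (0 + P.length + 1) + w a * (0 + P.length + 2)
      < w a * (0 + P.length) + w b * (0 + P.length + 1) + w c * (0 + P.length + 2) := by
    nlinarith
  omega

-- the four facts about one window update, for the three rotate cases at once
theorem pvStep_core (P S : List Int) (a b c : Int) :
    ((P ++ pvRotate [a, b, c] ++ S).Perm (P ++ a :: b :: c :: S)) ∧
    (pvInv (P ++ pvRotate [a, b, c] ++ S) < pvInv (P ++ a :: b :: c :: S) ∨
      (pvInv (P ++ pvRotate [a, b, c] ++ S) = pvInv (P ++ a :: b :: c :: S) ∧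
        pvPhi (P ++ pvRotate [a, b, c] ++ S) ≤ pvPhi (P ++ a :: b :: c :: S))) ∧
    (P ++ pvRotate [a, b, c] ++ S ≠ P ++ a :: b :: c :: S →
      (pvInv (P ++ pvRotate [a, b, c] ++ S) < pvInv (P ++ a :: b :: c :: S) ∨
        (pvInv (P ++ pvRotate [a, b, c] ++ S) = pvInv (P ++ a :: b :: c :: S) ∧
          pvPhi (P ++ pvRotate [a, b, c] ++ S) < pvPhi (P ++ a :: b :: c :: S)))) ∧
    (a ≠ c → pvInv (P ++ pvRotate [a, b, c] ++ S) % 2 = pvInv (P ++ a :: b :: c :: S) % 2) := by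
  have hX : P ++ a :: b :: c :: S = P ++ [a, b, c] ++ S := by simp
  by_cases h1 : a ≤ b ∧ a ≤ c
  · rw [pvRotate_1 h1.1 h1.2, ← hX]
    exact ⟨List.Perm.refl _, Or.inr ⟨rfl, le_refl _⟩, fun h => absurd rfl h, fun _ => rfl⟩
  · have hcase : (b < a ∧ b ≤ c) ∨ (c < a ∧ c < b) := by omega
    rcases hcase with ⟨hba, hbc⟩ | ⟨hca, hcb⟩
    · -- rotate gives [b, c, a]
      rw [pvRotate_2 hba hbc, hX]
      have hpermW : ([b, c, a]).Perm [a, b, c] := pvPerm2 a b c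
      have hperm : (P ++ [b, c, a] ++ S).Perm (P ++ [a, b, c] ++ S) := by
        rw [List.append_assoc, List.append_assoc]
        exact List.Perm.append_left P (hpermW.append_right S)
      have hrepl := pvInv_replace P S [a, b, c] [b, c, a] hpermW.symm
      by_cases hac : a < c
      · have hW : pvInv [a, b, c] = 1 := by rw [pvInv3]; split_ifs <;> omega
        have hW' : pvInv [b, c, a] = 1 := by rw [pvInv3]; split_ifs <;> omega
        have hphi := pvPhi_case2 P S a b c hba hbc hac
        exact ⟨hperm, Or.inr ⟨by omega, le_of_lt hphi⟩,
          fun _ => Or.inr ⟨by omega, hphi⟩, fun _ => by omega⟩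
      · have hW : 1 ≤ pvInv [a, b, c] := by rw [pvInv3]; split_ifs <;> omega
        have hW' : pvInv [b, c, a] = 0 := by rw [pvInv3]; split_ifs <;> omega
        have hW2 : a ≠ c → pvInv [a, b, c] = 2 := by
          intro h; rw [pvInv3]; split_ifs <;> omega
        refine ⟨hperm, Or.inl (by omega), fun _ => Or.inl (by omega), fun h => ?_⟩
        have := hW2 h
        omega
    · -- rotate gives [c, a, b]
      rw [pvRotate_3 hca hcb, hX]
      have hpermW : ([c, a, b]).Perm [a, b, c] := pvPerm3 a b c
      have hperm : (P ++ [c, a, b] ++ S).Perm (P ++ [a, b, c] ++ S) := by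
        rw [List.append_assoc, List.append_assoc]
        exact List.Perm.append_left P (hpermW.append_right S)
      have hrepl := pvInv_replace P S [a, b, c] [c, a, b] hpermW.symm
      have hW : pvInv [a, b, c] = (if b < a then 1 else 0) + 2 := by
        rw [pvInv3]; split_ifs <;> omega
      have hW' : pvInv [c, a, b] = (if b < a then 1 else 0) := by
        rw [pvInv3]; split_ifs <;> omega
      exact ⟨hperm, Or.inl (by omega), fun _ => Or.inl (by omega), fun _ => by omega⟩

theorem pvExists3 {l : List Int} (h : 3 ≤ l.length) : ∃ a b c t, l = a :: b :: c :: t := by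
  rcases l with _ | ⟨a, _ | ⟨b, _ | ⟨c, t⟩⟩⟩
  · simp at h
  · simp at h
  · simp at h
  · exact ⟨a, b, c, t, rfl⟩

-- every window index is admissible: the step keeps a permutation and the measure goes
-- lexicographically down whenever the list changes
theorem pvStep_facts (X : List Int) (i : Int) (h0 : 0 ≤ i) (h3 : i + 3 ≤ (X.length : Int)) :
    ((pvStep X i).Perm X) ∧
    (pvInv (pvStep X i) < pvInv X ∨ (pvInv (pvStep X i) = pvInv X ∧ pvPhi (pvStep X i) ≤ pvPhi X)) ∧
    (pvStep X i ≠ X →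
      (pvInv (pvStep X i) < pvInv X ∨ (pvInv (pvStep X i) = pvInv X ∧ pvPhi (pvStep X i) < pvPhi X))) ∧
    (X.Nodup → pvInv (pvStep X i) % 2 = pvInv X % 2) := by
  have hlen : 3 ≤ (X.drop i.toNat).length := by
    rw [List.length_drop]; omega
  obtain ⟨a, b, c, S, hd⟩ := pvExists3 hlen
  obtain ⟨P, hPX, hPlen⟩ : ∃ P : List Int, X = P ++ a :: b :: c :: S ∧ P.length = i.toNat :=
    ⟨X.take i.toNat, by rw [← hd, List.take_append_drop], by rw [List.length_take]; omega⟩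
  have hi : i = (P.length : Int) := by omega
  have hrw : pvStep X i = P ++ pvRotate [a, b, c] ++ S := by
    rw [hPX, hi, pvStep_window]
  have core := pvStep_core P S a b c
  rw [hrw, hPX]
  refine ⟨core.1, core.2.1, core.2.2.1, fun hnd => core.2.2.2 ?_⟩
  have h2 := hnd.of_append_right
  rw [List.nodup_cons] at h2
  intro hac
  exact h2.1 (by simp [hac])

theorem pvFold_facts (idxs : List Int) :
    ∀ X : List Int, (∀ i ∈ idxs, 0 ≤ i ∧ i + 3 ≤ (X.length : Int)) →
    ((idxs.foldl pvStep X).Perm X) ∧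
    (pvInv (idxs.foldl pvStep X) < pvInv X ∨
      (pvInv (idxs.foldl pvStep X) = pvInv X ∧ pvPhi (idxs.foldl pvStep X) ≤ pvPhi X)) ∧
    (idxs.foldl pvStep X ≠ X →
      (pvInv (idxs.foldl pvStep X) < pvInv X ∨
        (pvInv (idxs.foldl pvStep X) = pvInv X ∧ pvPhi (idxs.foldl pvStep X) < pvPhi X))) ∧
    (X.Nodup → pvInv (idxs.foldl pvStep X) % 2 = pvInv X % 2) ∧
    (idxs.foldl pvStep X = X → ∀ i ∈ idxs, pvStep X i = X) := by
  induction idxs with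
  | nil =>
    intro X _
    refine ⟨List.Perm.refl _, Or.inr ⟨rfl, le_refl _⟩, fun h => absurd rfl h, fun _ => rfl, ?_⟩
    intro _ j hj
    simp at hj
  | cons i rest ih =>
    intro X hb
    have hbi := hb i (List.mem_cons_self)
    have step := pvStep_facts X i hbi.1 hbi.2
    have hlenY : (pvStep X i).length = X.length := step.1.length_eq
    have ihY := ih (pvStep X i) (fun j hj => by
      rw [hlenY]; exact hb j (List.mem_cons_of_mem _ hj))
    simp only [List.foldl_cons]
    refine ⟨ihY.1.trans step.1, ?_, ?_, ?_, ?_⟩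
    · rcases ihY.2.1 with h1 | ⟨h1, h1'⟩ <;> rcases step.2.1 with h2 | ⟨h2, h2'⟩
      · exact Or.inl (by omega)
      · exact Or.inl (by omega)
      · exact Or.inl (by omega)
      · exact Or.inr ⟨by omega, by omega⟩
    · intro hne
      by_cases hYX : pvStep X i = X
      · rw [hYX] at ihY hne ⊢
        exact ihY.2.2.1 hne
      · have s1 := step.2.2.1 hYX
        rcases ihY.2.1 with h1 | ⟨h1, h1'⟩ <;> rcases s1 with h2 | ⟨h2, h2'⟩
        · exact Or.inl (by omega)
        · exact Or.inl (by omega)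
        · exact Or.inl (by omega)
        · exact Or.inr ⟨by omega, by omega⟩
    · intro hnd
      have hndY : (pvStep X i).Nodup := (step.1.nodup_iff).mpr hnd
      exact (ihY.2.2.2.1 hndY).trans (step.2.2.2 hnd)
    · intro hfix j hj
      by_cases hYX : pvStep X i = X
      · rcases List.mem_cons.1 hj with rfl | hjr
        · exact hYX
        · rw [hYX] at ihY hfix
          exact ihY.2.2.2.2 hfix j hjr
      · exfalso
        have s1 := step.2.2.1 hYX
        rw [hfix] at ihY
        rcases ihY.2.1 with h1 | ⟨h1, h1'⟩ <;> rcases s1 with h2 | ⟨h2, h2'⟩ <;> omega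

theorem pvPass_bounds (X : List Int) :
    ∀ i ∈ PySem.List.pyRange 0 ((X.length : Int) - 2) 1, 0 ≤ i ∧ i + 3 ≤ (X.length : Int) := by
  intro i hi
  rw [PySem.List.mem_pyRange_one] at hi
  omega


theorem pvInv_pairwise (X : List Int) (h : X.Pairwise (· ≤ ·)) : pvInv X = 0 := by
  induction X with
  | nil => rfl
  | cons x r ih =>
    rw [List.pairwise_cons] at h
    have : r.countP (fun y => decide (y < x)) = 0 := by
      rw [List.countP_eq_zero]
      intro y hy
      simpa using not_lt.2 (h.1 y hy)
    simp [pvInv, this, ih h.2]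

theorem pvPass_perm (X : List Int) : (pvPass X).Perm X := by
  unfold pvPass
  exact (pvFold_facts _ X (pvPass_bounds X)).1

theorem pvPass_parity (X : List Int) (hnd : X.Nodup) :
    pvInv (pvPass X) % 2 = pvInv X % 2 := by
  unfold pvPass
  exact (pvFold_facts _ X (pvPass_bounds X)).2.2.2.1 hnd

-- a fixed point of one pass has every window headed by its minimum
theorem pvFixed_windows (X : List Int) (h : pvPass X = X) (k : Nat)
    (hk : k + 3 ≤ X.length) :
    ∃ a b c S, X.drop k = a :: b :: c :: S ∧ a ≤ b ∧ a ≤ c := by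
  have hsteps := (pvFold_facts _ X (pvPass_bounds X)).2.2.2.2 (by unfold pvPass at h; exact h)
  have hmem : (k : Int) ∈ PySem.List.pyRange 0 ((X.length : Int) - 2) 1 :=
    PySem.List.mem_pyRange_one.2 ⟨by positivity, by omega⟩
  have hstep := hsteps (k : Int) hmem
  have hlen : 3 ≤ (X.drop ((k : Int)).toNat).length := by
    rw [List.length_drop]; omega
  obtain ⟨a, b, c, S, hd⟩ := pvExists3 hlen
  obtain ⟨P, hPX, hPlen⟩ : ∃ P : List Int, X = P ++ a :: b :: c :: S ∧ P.length = ((k : Int)).toNat :=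
    ⟨X.take ((k : Int)).toNat, by rw [← hd, List.take_append_drop], by rw [List.length_take]; omega⟩
  have hi : (k : Int) = (P.length : Int) := by omega
  have hrot : P ++ pvRotate [a, b, c] ++ S = P ++ a :: b :: c :: S := by
    calc P ++ pvRotate [a, b, c] ++ S = pvStep (P ++ a :: b :: c :: S) ((P.length : Int)) :=
          (pvStep_window _ _ _ _ _).symm
      _ = pvStep X (k : Int) := by rw [← hPX, ← hi]
      _ = X := hstep
      _ = P ++ a :: b :: c :: S := hPX
  have hW : pvRotate [a, b, c] = [a, b, c] := by
    have h1 : P ++ (pvRotate [a, b, c] ++ S) = P ++ ([a, b, c] ++ S) := by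
      rw [← List.append_assoc, hrot]
      simp
    exact List.append_cancel_right (List.append_cancel_left h1)
  refine ⟨a, b, c, S, by simpa using hd, ?_⟩
  by_cases h1 : a ≤ b ∧ a ≤ c
  · exact h1
  · exfalso
    have hcase : (b < a ∧ b ≤ c) ∨ (c < a ∧ c < b) := by omega
    rcases hcase with ⟨hba, hbc⟩ | ⟨hca, hcb⟩
    · rw [pvRotate_2 hba hbc] at hW
      simp at hW
      omega
    · rw [pvRotate_3 hca hcb] at hW
      simp at hW
      omega

-- in a list all of whose windows are headed by their minimum, the head is a lower bound
theorem pvHead_le : ∀ (r : List Int) (x : Int),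
    (∀ k, k + 3 ≤ (x :: r).length → ∃ a b c S, (x :: r).drop k = a :: b :: c :: S ∧ a ≤ b ∧ a ≤ c) →
    3 ≤ (x :: r).length → ∀ y ∈ r, x ≤ y := by
  intro r
  induction r with
  | nil => intro x _ _ y hy; cases hy
  | cons b t ih =>
    intro x hwd h3 y hy
    rcases t with _ | ⟨c0, t0⟩
    · simp at h3
    · obtain ⟨a, b2, c2, S2, heq, hab, hac⟩ := hwd 0 (by simp)
      simp only [List.drop_zero, List.cons.injEq] at heq
      obtain ⟨rfl, rfl, rfl, rfl⟩ := heq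
      rcases List.mem_cons.1 hy with rfl | hy2
      · exact hab
      · rcases t0 with _ | ⟨d, t1⟩
        · rcases List.mem_cons.1 hy2 with rfl | hy3
          · exact hac
          · cases hy3
        · have hwdr : ∀ k, k + 3 ≤ (b :: c0 :: d :: t1).length →
              ∃ a3 b3 c3 S3, (b :: c0 :: d :: t1).drop k = a3 :: b3 :: c3 :: S3 ∧ a3 ≤ b3 ∧ a3 ≤ c3 := by
            intro k hk
            have := hwd (k + 1) (by simp at hk ⊢; omega)
            simpa [List.drop_succ_cons] using this
          have hble := ih b hwdr (by simp) y hy2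
          omega

-- a list all of whose windows are headed by their minimum has at most one inversion,
-- and none iff it is nondecreasing
theorem pvWD_inv : ∀ (X : List Int),
    (∀ k, k + 3 ≤ X.length → ∃ a b c S, X.drop k = a :: b :: c :: S ∧ a ≤ b ∧ a ≤ c) →
    pvInv X ≤ 1 ∧ (pvInv X = 0 → X.Pairwise (· ≤ ·)) := by
  intro X
  induction X with
  | nil => intro _; simp [pvInv]
  | cons x r ih =>
    intro hwd
    by_cases h3 : 3 ≤ (x :: r).length
    · have hle := pvHead_le r x hwd h3
      have hcnt : r.countP (fun y => decide (y < x)) = 0 := by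
        rw [List.countP_eq_zero]
        intro y hy
        simpa using not_lt.2 (hle y hy)
      have hwdr : ∀ k, k + 3 ≤ r.length →
          ∃ a b c S, r.drop k = a :: b :: c :: S ∧ a ≤ b ∧ a ≤ c := by
        intro k hk
        have := hwd (k + 1) (by simp at hk ⊢; omega)
        simpa [List.drop_succ_cons] using this
      obtain ⟨ih1, ih2⟩ := ih hwdr
      have hx : pvInv (x :: r) = pvInv r := by simp [pvInv, hcnt]
      exact ⟨by omega, fun h0 => List.pairwise_cons.2 ⟨hle, ih2 (by omega)⟩⟩
    · rcases r with _ | ⟨u, _ | ⟨v, t⟩⟩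
      · simp [pvInv]
      · have hinv : pvInv [x, u] = if u < x then 1 else 0 := by
          simp [pvInv, List.countP_cons]
        constructor
        · rw [hinv]; split_ifs <;> omega
        · intro h0
          rw [hinv] at h0
          have : ¬ u < x := by
            by_contra hlt
            rw [if_pos hlt] at h0
            omega
          simp [List.pairwise_cons]
          omega
      · simp at h3

theorem pvSorted_of_perm {X Z : List Int} (hnd : X.Nodup) (h : Z.Perm X) :
    PySem.List.sorted Z (fun x => x) false = PySem.List.sorted X (fun x => x) false := by
  have hys := PySem.List.sorted_perm X (fun x => x) false
  have hpair := PySem.List.sorted_pairwise X (fun x => x)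
  have hndys : (PySem.List.sorted X (fun x => x) false).Nodup := (hys.nodup_iff).mpr hnd
  have hlt : (PySem.List.sorted X (fun x => x) false).Pairwise (fun a b => a < b) :=
    (hpair.and hndys).imp (fun hab => lt_of_le_of_ne hab.1 hab.2)
  exact PySem.List.sorted_eq_of_perm_of_pairwise_lt Z _ _ (hys.trans h.symm) hlt

theorem pvPhiAux_le (w : Int → Nat) : ∀ (L : List Int) (k : Nat),
    pvPhiAux w L k ≤ (L.map w).sum * (k + L.length) := by
  intro L
  induction L with
  | nil => simp [pvPhiAux]
  | cons x r ih =>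
    intro k
    have h1 := ih (k + 1)
    simp only [pvPhiAux, List.map_cons, List.sum_cons, List.length_cons]
    nlinarith

theorem pvPhi_le_PB {Y X : List Int} (h : Y.Perm X) : pvPhi Y ≤ pvPB X := by
  have h1 := pvPhiAux_le (pvWt Y) Y 0
  have h2 : (Y.map (pvWt Y)).sum = (X.map (pvWt X)).sum := by
    rw [pvWt_perm h]
    exact (h.map _).sum_eq
  have h3 : Y.length = X.length := h.length_eq
  unfold pvPhi pvPB
  calc pvPhiAux (pvWt Y) Y 0 ≤ (Y.map (pvWt Y)).sum * (0 + Y.length) := h1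
    _ = (X.map (pvWt X)).sum * X.length := by rw [h2, h3]; ring

theorem pvPB_perm {Y X : List Int} (h : Y.Perm X) : pvPB Y = pvPB X := by
  unfold pvPB
  rw [pvWt_perm h, (h.map _).sum_eq, h.length_eq]

theorem pvInv_le_sq : ∀ X : List Int, pvInv X ≤ X.length * X.length := by
  intro X
  induction X with
  | nil => simp [pvInv]
  | cons x r ih =>
    have hc : r.countP (fun y => decide (y < x)) ≤ r.length := List.countP_le_length
    simp only [pvInv, List.length_cons]
    nlinarith

theorem pvPass_strict (X : List Int) (h : pvPass X ≠ X) :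
    pvInv (pvPass X) < pvInv X ∨
      (pvInv (pvPass X) = pvInv X ∧ pvPhi (pvPass X) < pvPhi X) := by
  unfold pvPass at h ⊢
  exact (pvFold_facts _ X (pvPass_bounds X)).2.2.1 h

-- every changing pass strictly decreases the combined measure
theorem pvPass_M_lt (X : List Int) (h : pvPass X ≠ X) : pvM (pvPass X) < pvM X := by
  have hstr := pvPass_strict X h
  have hPB : pvPB (pvPass X) = pvPB X := pvPB_perm (pvPass_perm X)
  have hphi : pvPhi (pvPass X) ≤ pvPB X := pvPhi_le_PB (pvPass_perm X)
  unfold pvM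
  rw [hPB]
  rcases hstr with h1 | ⟨h1, h2⟩
  · nlinarith
  · rw [h1]; omega

theorem pvLoopF_eq : ∀ (fuel : Nat) (answer X : List Int), X.Nodup →
    answer = PySem.List.sorted X (fun x => x) false → pvM X < fuel →
    pvLoop fuel answer X = if pvInv X % 2 = 0 then "YES" else "NO" := by
  intro fuel
  induction fuel with
  | zero => intro answer X _ _ hlt; omega
  | succ fuel ih =>
    intro answer X hnd hans hlt
    have hunf : pvLoop (fuel + 1) answer X =
        if pvPass X = answer then "YES"
        else if X = pvPass X then "NO" else pvLoop fuel answer (pvPass X) := rfl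
    rw [hunf]
    by_cases hYES : pvPass X = answer
    · rw [if_pos hYES]
      have h0 : pvInv answer = 0 := by
        rw [hans]
        exact pvInv_pairwise _ (PySem.List.sorted_pairwise X (fun x => x))
      have hpar := pvPass_parity X hnd
      rw [hYES, h0] at hpar
      rw [if_pos (by omega)]
    · rw [if_neg hYES]
      by_cases hFIX : X = pvPass X
      · rw [if_pos hFIX]
        have hfix : pvPass X = X := hFIX.symm
        have ⟨hb1, hb2⟩ := pvWD_inv X (fun k hk => pvFixed_windows X hfix k hk)
        have hone : pvInv X = 1 := by
          rcases Nat.lt_or_ge (pvInv X) 1 with h | h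
          · exfalso
            have hpw := hb2 (by omega)
            have hS : PySem.List.sorted X (fun x => x) false = X :=
              PySem.List.sorted_eq_self_of_pairwise X _ hpw
            exact hYES (by rw [hfix, hans, hS])
          · omega
        rw [if_neg (by omega)]
      · rw [if_neg hFIX]
        have hndY : (pvPass X).Nodup := ((pvPass_perm X).nodup_iff).mpr hnd
        have hansY : answer = PySem.List.sorted (pvPass X) (fun x => x) false := by
          rw [hans, pvSorted_of_perm hnd (pvPass_perm X)]
        have hMY : pvM (pvPass X) < fuel := by
          have := pvPass_M_lt X (fun he => hFIX he.symm)
          omega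
        rw [ih answer (pvPass X) hndY hansY hMY, pvPass_parity X hnd]

-- ===== VERDICT (by name: the statement is the Claim_ definition above) =====
theorem larrysArray_spec : Claim_equal_larrysArray := by
  intro A _ hpre
  unfold Spec_larrysArray larrysArray larrysArray_alt
  refine pvLoopF_eq _ _ A hpre rfl ?_
  have h1 := pvInv_le_sq A
  have h2 : pvPhi A ≤ pvPB A := pvPhi_le_PB (List.Perm.refl A)
  unfold pvM
  nlinarith
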